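-- pv_equiv track=rewrite | github.com/bejeri4/Algo | JustifiedText.py | lineFromWords
-- ===== SOURCE A (Python) =====
-- def numExtraSpaces(arr, maxLen):
--     l = 0
--     for w in arr:
--         l += len(w)
--     return maxLen - l
--
-- def lineFromWords(arr, maxLen):
--     numSpaces = numExtraSpaces(arr, maxLen)
--     if len(arr) == 1:
--         arr[0] += " " * numSpaces
--     else:
--         w = 0
--         while numSpaces > 0:
--             arr[w] += " "
--             w = (w + 1) % (len(arr) - 1)
--             numSpaces -= 1
--     return "".join(arr)
-- ===== SOURCE B (Python) =====
-- def lineFromWords(arr, maxLen):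
--     # Closed-form justification: each gap's space count comes from divmod and
--     # every word is padded once (no round-robin distribution loop).
--     # Return-value equivalence only: A mutates arr in place, B does not.
--     n = maxLen - sum(len(w) for w in arr)
--     if n < 0:
--         n = 0
--     if len(arr) <= 1:
--         return "".join(arr) + " " * n
--     gaps = len(arr) - 1
--     q, r = divmod(n, gaps)
--     return "".join(w + " " * (q + (1 if i < r else 0))
--                    for i, w in enumerate(arr[:-1])) + arr[-1]
-- ===== Notes on version B (the rewrite author's own statement) =====
-- stated objective: alternative
-- what changed: Replaces A's one-space-at-a-time round-robin while-loop over the gaps by a closed form: divmod gives each gap's space count and every word is padded once.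
-- outside the precondition, e.g. on lineFromWords([], 1): A raises IndexError, B returns ' '
import Mathlib
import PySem

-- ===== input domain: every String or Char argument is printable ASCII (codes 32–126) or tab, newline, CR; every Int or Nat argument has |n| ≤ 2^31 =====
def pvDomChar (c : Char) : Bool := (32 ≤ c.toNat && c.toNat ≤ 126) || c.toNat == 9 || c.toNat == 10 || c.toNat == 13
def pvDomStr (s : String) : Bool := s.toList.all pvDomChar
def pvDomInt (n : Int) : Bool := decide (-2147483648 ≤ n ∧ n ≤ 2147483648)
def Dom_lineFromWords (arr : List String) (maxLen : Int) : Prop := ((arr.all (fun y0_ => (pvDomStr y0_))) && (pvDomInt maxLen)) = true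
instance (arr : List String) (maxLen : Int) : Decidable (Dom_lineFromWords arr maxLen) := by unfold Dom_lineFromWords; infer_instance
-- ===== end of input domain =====

-- B replaces A's one-space-at-a-time round-robin loop by a per-gap divmod closed form
-- (objective: alternative). Return-value equivalence only: Python A mutates arr in place, B does not.

-- " " * n  (empty for n ≤ 0); shared by both Pythons, ported once
def pySpaces (n : Int) : String := String.ofList (PySem.List.pyRepeat [' '] n)

-- ===== PORT A =====
def numExtraSpaces (arr : List String) (maxLen : Int) : Int :=
  maxLen - arr.foldl (fun l w => l + PySem.Str.len w) 0

-- the 'while numSpaces > 0' loop: runs exactly numSpaces.toNat times; arr[w] += " " is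
-- in range on every executed iteration inside Pre_ (w < len(arr) - 1), so getD is exact there
def pvAloop : List String → Nat → Nat → List String
  | arr, _, 0 => arr
  | arr, w, n + 1 => pvAloop (arr.set w (arr.getD w "" ++ " ")) ((w + 1) % (arr.length - 1)) n

def lineFromWords (arr : List String) (maxLen : Int) : String :=
  let numSpaces := numExtraSpaces arr maxLen
  if arr.length == 1 then
    PySem.Str.join "" (arr.set 0 (arr.getD 0 "" ++ pySpaces numSpaces))
  else
    PySem.Str.join "" (pvAloop arr 0 numSpaces.toNat)

-- ===== PORT B =====
def lineFromWords_alt (arr : List String) (maxLen : Int) : String :=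
  let n0 := maxLen - (arr.map PySem.Str.len).sum
  let n := if n0 < 0 then 0 else n0
  if arr.length ≤ 1 then
    PySem.Str.join "" arr ++ pySpaces n
  else
    let gaps : Int := (arr.length : Int) - 1
    let q := PySem.Int.floordiv n gaps
    let r := PySem.Int.mod n gaps
    PySem.Str.join ""
      ((PySem.List.enumerate (PySem.List.slice arr none (some (-1)))).map
        (fun iw => iw.2 ++ pySpaces (q + if iw.1 < r then 1 else 0)))
      ++ PySem.List.pyGetD arr (-1) ""

-- ===== PRECONDITION & SPEC =====
-- Pre_ excludes only arr = [] with positive leftover space, where A raises IndexError.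
def Pre_lineFromWords (arr : List String) (maxLen : Int) : Prop := arr ≠ [] ∨ maxLen ≤ 0
instance (arr : List String) (maxLen : Int) : Decidable (Pre_lineFromWords arr maxLen) := by
  unfold Pre_lineFromWords; infer_instance

def pvWitness_lineFromWords : List String × Int := (["ab", "c"], 8)

def Spec_lineFromWords (arr : List String) (maxLen : Int) (out : String) : Prop :=
  out = lineFromWords_alt arr maxLen
instance (arr : List String) (maxLen : Int) (out : String) : Decidable (Spec_lineFromWords arr maxLen out) := by
  unfold Spec_lineFromWords; infer_instance

-- ===== CLAIM =====
def Claim_equal_lineFromWords : Prop := ∀ (arr : List String) (maxLen : Int),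
  Dom_lineFromWords arr maxLen → Pre_lineFromWords arr maxLen →
  Spec_lineFromWords arr maxLen (lineFromWords arr maxLen)

-- ===== LEMMAS AND PROOFS =====

theorem toList_pySpaces (n : Int) : (pySpaces n).toList = List.replicate n.toNat ' ' := by
  simp [pySpaces, PySem.List.pyRepeat_singleton]

theorem length_pvAloop : ∀ (n : Nat) (arr : List String) (w : Nat),
    (pvAloop arr w n).length = arr.length := by
  intro n
  induction n with
  | zero => intro arr w; rfl
  | succ n ih => intro arr w; simp [pvAloop, ih]

theorem sum_foldl_len (arr : List String) :
    arr.foldl (fun l w => l + PySem.Str.len w) 0 = (arr.map PySem.Str.len).sum := by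
  rw [List.sum_eq_foldl, List.foldl_map]

-- count of j < n with j ≡ i (mod g): the per-gap space count B computes with divmod
theorem countP_mod_closed (g i : Nat) (hg : 0 < g) (hi : i < g) : ∀ (n : Nat),
    (List.range n).countP (fun j => j % g == i) = n / g + (if i < n % g then 1 else 0) := by
  intro n
  induction n with
  | zero => simp
  | succ n ih =>
    have hmod : n % g < g := Nat.mod_lt _ hg
    have hsing : List.countP (fun j => j % g == i) [n] = if n % g = i then 1 else 0 := by
      simp [List.countP_cons, List.countP_nil]
    rw [List.range_succ, List.countP_append, ih, hsing]
    by_cases hcase : n % g + 1 = g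
    · have h1 : n + 1 = g * (n / g + 1) := by
        rw [Nat.mul_add, Nat.mul_one]
        have hdm := Nat.div_add_mod n g
        omega
      have hdiv : (n + 1) / g = n / g + 1 := by rw [h1, Nat.mul_div_cancel_left _ hg]
      have hm : (n + 1) % g = 0 := by rw [h1]; exact Nat.mul_mod_right g _
      rw [hdiv, hm]
      clear h1 hdiv hm ih hsing
      split_ifs <;> omega
    · have h1 : n + 1 = g * (n / g) + (n % g + 1) := by
        have hdm := Nat.div_add_mod n g
        omega
      have hdiv : (n + 1) / g = n / g := by
        rw [h1, Nat.mul_add_div hg, Nat.div_eq_of_lt (show n % g + 1 < g by omega), Nat.add_zero]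
      have hm : (n + 1) % g = n % g + 1 := by
        rw [h1, Nat.mul_add_mod, Nat.mod_eq_of_lt (show n % g + 1 < g by omega)]
      rw [hdiv, hm]
      clear h1 hdiv hm ih hsing
      split_ifs <;> omega

-- A's loop adds, to word i, one space per executed step j with (w + j) % g = i
theorem pvAloop_getD (g : Nat) (hg : 0 < g) : ∀ (n : Nat) (arr : List String) (w : Nat),
    arr.length = g + 1 → w < g → ∀ (i : Nat),
    ((pvAloop arr w n).getD i "").toList
      = (arr.getD i "").toList
        ++ List.replicate ((List.range n).countP (fun j => (w + j) % g == i)) ' ' := by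
  intro n
  induction n with
  | zero => intro arr w hl hw i; simp [pvAloop]
  | succ n ih =>
    intro arr w hl hw i
    have hglen : arr.length - 1 = g := by omega
    have hww : w < arr.length := by omega
    have hl' : (arr.set w (arr.getD w "" ++ " ")).length = g + 1 := by simp [hl]
    have hw' : (w + 1) % (arr.length - 1) < g := by rw [hglen]; exact Nat.mod_lt _ hg
    show ((pvAloop (arr.set w (arr.getD w "" ++ " ")) ((w + 1) % (arr.length - 1)) n).getD i "").toList = _
    rw [ih _ _ hl' hw' i]
    have hpred : (fun j => (((w + 1) % (arr.length - 1)) + j) % g == i)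
        = (fun j => (w + (j + 1)) % g == i) := by
      funext j
      rw [hglen, Nat.mod_add_mod, show w + 1 + j = w + (j + 1) by omega]
    rw [hpred]
    have hcomp : ((fun j => (w + j) % g == i) ∘ Nat.succ) = (fun j => (w + (j + 1)) % g == i) := rfl
    rw [List.range_succ_eq_map, List.countP_cons, List.countP_map, hcomp]
    by_cases hiw : i = w
    · subst hiw
      have hset : ((arr.set i (arr.getD i "" ++ " ")).getD i "") = arr.getD i "" ++ " " := by
        rw [List.getD_eq_getElem _ _ (by simpa using hww), List.getElem_set_self]
      rw [hset]
      have h0 : ((i + 0) % g == i) = true := by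
        simp [Nat.mod_eq_of_lt (show i < g from hw)]
      rw [h0]
      simp only [String.toList_append, show (" " : String).toList = [' '] from rfl,
        if_true, List.append_assoc, List.singleton_append]
      rw [List.replicate_succ]
    · have hset : ((arr.set w (arr.getD w "" ++ " ")).getD i "") = arr.getD i "" := by
        rcases Nat.lt_or_ge i arr.length with hlt | hge
        · rw [List.getD_eq_getElem _ _ (by simpa using hlt),
            List.getElem_set_ne (by omega), List.getD_eq_getElem _ _ hlt]
        · rw [List.getD_eq_default _ _ (by simpa using hge), List.getD_eq_default _ _ hge]
      rw [hset]
      have h0 : ((w + 0) % g == i) = false := by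
        simp [Nat.mod_eq_of_lt (show w < g from hw)]
        omega
      rw [h0]
      simp

-- B's list comprehension, elementwise
theorem map_enumerate_getElem {α β : Type} (f : Int × α → β) : ∀ (xs : List α) (s : Int) (i : Nat)
    (h1 : i < ((PySem.List.enumerate xs s).map f).length) (h2 : i < xs.length),
    ((PySem.List.enumerate xs s).map f)[i]'h1 = f (s + i, xs[i]'h2) := by
  intro xs
  induction xs with
  | nil => intro s i h1 h2; simp at h2
  | cons x xs ih =>
    intro s i h1 h2
    cases i with
    | zero => simp [PySem.List.enumerate_cons]
    | succ i =>
      have h2' : i < xs.length := by simpa using h2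
      have h1' : i < ((PySem.List.enumerate xs (s + 1)).map f).length := by
        simp [PySem.List.length_enumerate]; omega
      have hstep : ((PySem.List.enumerate (x :: xs) s).map f)[i + 1]'h1
          = ((PySem.List.enumerate xs (s + 1)).map f)[i]'h1' := by
        simp [PySem.List.enumerate_cons]
      rw [hstep, ih (s + 1) i h1' h2']
      congr 1
      simp
      omega

theorem slice_neg_one {α : Type} (xs : List α) (h : xs ≠ []) :
    PySem.List.slice xs none (some (-1)) = xs.dropLast := by
  simp [PySem.List.slice, PySem.List.clampIdx]
  rw [if_neg h, List.dropLast_eq_take]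
  congr 1
  omega

theorem pyGetD_neg_one {α : Type} (xs : List α) (d : α)
    (h2 : xs.length - 1 < xs.length) :
    PySem.List.pyGetD xs (-1) d = xs[xs.length - 1]'h2 := by
  simp [PySem.List.pyGetD, PySem.List.pyGet?, PySem.List.pyIdx?]
  rw [if_pos (show 1 ≤ xs.length by omega)]
  simp [List.getElem?_eq_getElem h2]

theorem chars_join_snoc : ∀ (css : List (List Char)) (cs : List Char),
    PySem.Chars.join [] (css ++ [cs]) = PySem.Chars.join [] css ++ cs := by
  intro css cs
  induction css with
  | nil => simp [PySem.Chars.join_singleton, PySem.Chars.join_nil]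
  | cons c css ih =>
    cases css with
    | nil =>
      rw [show (([c] ++ [cs]) : List (List Char)) = [c, cs] from rfl, PySem.Chars.join_cons_cons,
        PySem.Chars.join_singleton, PySem.Chars.join_singleton]
      simp
    | cons d css =>
      have h1 : ((c :: d :: css) ++ [cs] : List (List Char)) = c :: d :: (css ++ [cs]) := rfl
      rw [h1, PySem.Chars.join_cons_cons, PySem.Chars.join_cons_cons]
      rw [show (d :: (css ++ [cs]) : List (List Char)) = (d :: css) ++ [cs] from rfl, ih]
      simp

theorem str_join_snoc (ys : List String) (x : String) :
    PySem.Str.join "" (ys ++ [x]) = PySem.Str.join "" ys ++ x := by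
  apply String.toList_inj.mp
  simp only [PySem.Str.toList_join, List.map_append, List.map_cons, List.map_nil,
    String.toList_append]
  have : ("" : String).toList = [] := rfl
  rw [this, chars_join_snoc]

-- the two lists of padded words coincide (the heart of the equivalence)
theorem lists_eq (x y : String) (rest : List String) (n : Nat) (q r : Int)
    (hq : q = ((n / (rest.length + 1) : Nat) : Int))
    (hr : r = ((n % (rest.length + 1) : Nat) : Int)) :
    pvAloop (x :: y :: rest) 0 n
      = ((PySem.List.enumerate (PySem.List.slice (x :: y :: rest) none (some (-1)))).map
          (fun iw => iw.2 ++ pySpaces (q + if iw.1 < r then 1 else 0)))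
        ++ [PySem.List.pyGetD (x :: y :: rest) (-1) ""] := by
  have hne : (x :: y :: rest) ≠ [] := by simp
  have hg : 0 < rest.length + 1 := by omega
  set arr := x :: y :: rest with harr
  set g := rest.length + 1 with hgdef
  have hl : arr.length = g + 1 := by simp [harr, hgdef]
  have hlast : arr.length - 1 < arr.length := by omega
  rw [slice_neg_one arr hne, pyGetD_neg_one arr "" hlast]
  apply List.ext_getElem
  · simp [length_pvAloop, PySem.List.length_enumerate, hl]
  · intro i h1 h2
    have hiL : i < g + 1 := by rw [← hl, ← length_pvAloop n arr 0]; exact h1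
    have hBlen : ((PySem.List.enumerate arr.dropLast).map
        (fun iw => iw.2 ++ pySpaces (q + if iw.1 < r then 1 else 0))).length = g := by
      simp [PySem.List.length_enumerate, hl]
    have hgetD : ((pvAloop arr 0 n)[i]'h1) = (pvAloop arr 0 n).getD i "" := by
      rw [List.getD_eq_getElem _ _ h1]
    by_cases hig : i < g
    · have hidrop : i < arr.dropLast.length := by simp [hl]; omega
      have hleft : ((PySem.List.enumerate arr.dropLast).map
            (fun iw => iw.2 ++ pySpaces (q + if iw.1 < r then 1 else 0)) ++ [arr[arr.length - 1]'hlast])[i]'h2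
          = ((PySem.List.enumerate arr.dropLast).map
            (fun iw => iw.2 ++ pySpaces (q + if iw.1 < r then 1 else 0)))[i]'(by omega) := by
        rw [List.getElem_append_left]
      rw [hleft, map_enumerate_getElem _ arr.dropLast 0 i _ hidrop, hgetD]
      apply String.toList_inj.mp
      rw [pvAloop_getD g hg n arr 0 hl hg i]
      have hzero : (fun j => (0 + j) % g == i) = (fun j => j % g == i) := by
        funext j; rw [Nat.zero_add]
      rw [hzero, countP_mod_closed g i hg hig n]
      have hdl : arr.dropLast[i]'hidrop = arr[i]'(by omega) := List.getElem_dropLast ..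
      rw [String.toList_append, hdl, toList_pySpaces]
      have hidx : i < arr.length := by omega
      rw [List.getD_eq_getElem _ _ hidx]
      congr 1
      subst hq hr
      simp only [zero_add]
      by_cases hc : i < n % g
      · rw [if_pos hc, if_pos (show (i : Int) < ((n % g : Nat) : Int) by exact_mod_cast hc)]
        congr 1
      · rw [if_neg hc, if_neg (show ¬ ((i : Int) < ((n % g : Nat) : Int)) by exact_mod_cast hc)]
        congr 1
    · have hieq : i = g := by omega
      have hright : ((PySem.List.enumerate arr.dropLast).map
            (fun iw => iw.2 ++ pySpaces (q + if iw.1 < r then 1 else 0)) ++ [arr[arr.length - 1]'hlast])[i]'h2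
          = arr[arr.length - 1]'hlast := by
        rw [List.getElem_append_right (by omega)]
        simp [hBlen, hieq]
      rw [hright, hgetD]
      apply String.toList_inj.mp
      rw [pvAloop_getD g hg n arr 0 hl hg i]
      have hcnt : (List.range n).countP (fun j => (0 + j) % g == i) = 0 := by
        apply List.countP_eq_zero.mpr
        intro j hj
        simp only [beq_iff_eq, Nat.zero_add]
        have := Nat.mod_lt j hg
        omega
      rw [hcnt]
      have hlg : arr.length - 1 = g := by omega
      have : arr.getD i "" = arr[arr.length - 1]'hlast := by
        rw [List.getD_eq_getElem _ _ (show i < arr.length by omega)]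
        congr 1
      rw [this]
      simp

-- ===== VERDICT =====
theorem lineFromWords_spec : Claim_equal_lineFromWords := by
  intro arr maxLen _ hpre
  unfold Spec_lineFromWords lineFromWords lineFromWords_alt numExtraSpaces
  rw [sum_foldl_len]
  rcases arr with _ | ⟨x, rest⟩
  · rcases hpre with h | h
    · exact absurd rfl h
    · rw [if_neg (show ¬ ((([] : List String).length == 1) = true) by simp),
        if_pos (show ([] : List String).length ≤ 1 by simp)]
      have hns : (maxLen - (([] : List String).map PySem.Str.len).sum) = maxLen := by simp
      rw [hns]
      have ht : maxLen.toNat = 0 := by omega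
      rw [ht, show pvAloop [] 0 0 = [] from rfl]
      apply String.toList_inj.mp
      have hB : (if maxLen < 0 then 0 else maxLen).toNat = 0 := by omega
      simp [PySem.Str.join, toList_pySpaces, hB]
  · rcases rest with _ | ⟨y, rest⟩
    · rw [if_pos (show (([x].length == 1) = true) by simp),
        if_pos (show [x].length ≤ 1 by simp)]
      have hset : ([x].set 0 ([x].getD 0 "" ++ pySpaces (maxLen - ([x].map PySem.Str.len).sum)))
          = [x ++ pySpaces (maxLen - ([x].map PySem.Str.len).sum)] := rfl
      rw [hset]
      have hj1 : ∀ s : String, PySem.Str.join "" [s] = s := by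
        intro s; simp [PySem.Str.join]
      rw [hj1, hj1]
      apply String.toList_inj.mp
      set ns := maxLen - ([x].map PySem.Str.len).sum with hns
      have hB : (if ns < 0 then 0 else ns).toNat = ns.toNat := by omega
      simp [String.toList_append, toList_pySpaces, hB]
    · -- two or more words
      rw [if_neg (show ¬ (((x :: y :: rest).length == 1) = true) by
            simp only [List.length_cons, beq_iff_eq]; omega),
        if_neg (show ¬ ((x :: y :: rest).length ≤ 1) by
            simp only [List.length_cons]; omega)]
      set ns := maxLen - ((x :: y :: rest).map PySem.Str.len).sum with hns
      set nB := if ns < 0 then 0 else ns with hnB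
      have hnBc : nB = ((ns.toNat : Nat) : Int) := by
        rw [hnB]; split <;> omega
      have hgaps : (((x :: y :: rest).length : Nat) : Int) - 1 = ((rest.length + 1 : Nat) : Int) := by
        simp only [List.length_cons]
        push_cast
        ring
      dsimp only
      have hq : PySem.Int.floordiv nB ((((x :: y :: rest).length : Nat) : Int) - 1)
          = ((ns.toNat / (rest.length + 1) : Nat) : Int) := by
        rw [hnBc, hgaps, PySem.Int.floordiv_natCast]
      have hr : PySem.Int.mod nB ((((x :: y :: rest).length : Nat) : Int) - 1)
          = ((ns.toNat % (rest.length + 1) : Nat) : Int) := by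
        rw [hnBc, hgaps, PySem.Int.mod_natCast]
      rw [hq, hr, lists_eq x y rest ns.toNat _ _ rfl rfl, str_join_snoc]
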